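-- pv_equiv track=rewrite | github.com/vladqazxczakladqa/.vladqakuleshov | main (83).py | count_required_skills
-- ===== SOURCE A (Python) =====
-- def count_required_skills(skills_tree, required_skills):
--     # создаем множество для хранения уже изученных навыков
--     learned_skills = set()
--
--     # создаем стек для обхода дерева навыков в глубину
--     stack = []
--     stack.append(0)
--
--     # обходим дерево в глубину, добавляем каждый изученный навык в learned_skills
--     while stack:
--         current_skill = stack.pop()
--         learned_skills.add(current_skill)
--
--         # проверяем, есть ли у текущего навыка дочерние навыки
--         if current_skill in skills_tree:
--             for child_skill in skills_tree[current_skill]: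
--                 stack.append(child_skill)
--
--     # считаем количество необходимых навыков, которые еще не были изучены
--     required_skills_count = 0
--     for skill in required_skills:
--         if skill not in learned_skills:
--             required_skills_count += 1
--
--     return required_skills_count
-- ===== SOURCE B (Python) =====
-- def count_required_skills(skills_tree, required_skills):
--     # Saturation (fixpoint) computation of the skills reachable from the root 0,
--     # instead of an explicit-stack depth-first traversal.
--     learned = {0}
--     while True:
--         expanded = set(learned)
--         for skill in learned:
--             expanded.update(skills_tree.get(skill, []))
--         if expanded == learned:
--             break
--         learned = expanded
--     return sum(1 for skill in required_skills if skill not in learned)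
-- ===== Notes on version B (the rewrite author's own statement) =====
-- stated objective: alternative
-- what changed: Replaces the explicit-stack depth-first traversal (which re-pushes already-learned skills and can revisit them exponentially often) by a saturation/fixpoint computation of the reachable set: repeatedly expand the learned set with all children of its members until it stops growing; the per-occurrence counting loop over required_skills is unchanged.
import Mathlib
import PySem

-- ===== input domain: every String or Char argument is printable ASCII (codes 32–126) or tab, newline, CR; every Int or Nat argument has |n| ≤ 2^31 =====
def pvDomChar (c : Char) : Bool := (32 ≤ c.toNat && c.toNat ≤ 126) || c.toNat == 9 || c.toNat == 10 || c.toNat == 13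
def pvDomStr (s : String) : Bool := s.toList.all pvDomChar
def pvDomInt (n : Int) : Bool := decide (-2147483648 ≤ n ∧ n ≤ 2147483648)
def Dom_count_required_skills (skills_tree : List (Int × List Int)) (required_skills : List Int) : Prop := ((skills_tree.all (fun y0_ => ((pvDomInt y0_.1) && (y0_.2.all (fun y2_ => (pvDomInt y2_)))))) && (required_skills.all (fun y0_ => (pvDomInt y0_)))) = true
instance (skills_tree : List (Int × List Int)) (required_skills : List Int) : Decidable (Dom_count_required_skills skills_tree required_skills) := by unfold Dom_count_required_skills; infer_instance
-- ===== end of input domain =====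

-- B replaces A's explicit-stack DFS (which re-pushes already-learned skills) by a saturation /
-- fixpoint computation of the set reachable from skill 0; the per-occurrence counting loop over
-- required_skills is kept unchanged.

-- all child entries of the dict, a shared size bound (used by A's fuel and B's termination measure)
def allChildren (d : List (Int × List Int)) : List Int := (d.map Prod.snd).flatten

-- ===== PORT A =====
-- A's while-loop: pop the stack top, learn it, push its children (Python pops the list END, so the
-- head of this list is the stack top and children arrive reversed).  The loop is made total by a
-- fuel counter; under Pre_ (no cycle reachable from skill 0) the fuel below provably suffices, so
-- inside Pre_ the port computes exactly what A's unbounded loop computes.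
def loopA (d : List (Int × List Int)) : Nat → List Int → PySem.Set Int → PySem.Set Int
  | 0, _, learned => learned
  | _ + 1, [], learned => learned
  | f + 1, v :: rest, learned =>
      match PySem.Dict.get? (PySem.Dict.mk d) v with
      | some cs => loopA d f (cs.reverse ++ rest) (PySem.Set.add learned v)
      | none => loopA d f rest (PySem.Set.add learned v)

def fuelA (d : List (Int × List Int)) : Nat := ((allChildren d).length + 2) ^ (d.length + 1) + 1

def count_required_skills (skills_tree : List (Int × List Int)) (required_skills : List Int) : Int :=
  let learned := loopA skills_tree (fuelA skills_tree) [0] PySem.Set.empty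
  required_skills.foldl (fun c s => if PySem.Set.contains learned s then c else c + 1) 0

-- ===== PORT B =====
-- skills_tree.get(s, [])
def chD (d : List (Int × List Int)) (v : Int) : List Int :=
  PySem.Dict.getD (PySem.Dict.mk d) v []

-- expanded = set(learned); for s in learned: expanded.update(skills_tree.get(s, []))
def expandB (d : List (Int × List Int)) (S : PySem.Set Int) : PySem.Set Int :=
  S.foldl (fun E s => (chD d s).foldl PySem.Set.add E) S

-- facts the recursion in saturB needs for termination (cited in decreasing_by)
theorem mem_foldl_add {xs : List Int} {E : PySem.Set Int} {x : Int} :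
    x ∈ xs.foldl PySem.Set.add E ↔ x ∈ E ∨ x ∈ xs := by
  induction xs generalizing E with
  | nil => simp
  | cons a xs ih =>
      simp only [List.foldl_cons, ih, PySem.Set.mem_add, List.mem_cons]
      tauto

theorem mem_foldl_update (g : Int → List Int) (l : List Int) (E : PySem.Set Int) (x : Int) :
    x ∈ l.foldl (fun E s => (g s).foldl PySem.Set.add E) E ↔ x ∈ E ∨ ∃ s ∈ l, x ∈ g s := by
  induction l generalizing E with
  | nil => simp
  | cons a l ih =>
      simp only [List.foldl_cons, ih, mem_foldl_add, List.mem_cons]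
      constructor
      · rintro ((h | h) | ⟨s, hs, hx⟩)
        · exact Or.inl h
        · exact Or.inr ⟨a, Or.inl rfl, h⟩
        · exact Or.inr ⟨s, Or.inr hs, hx⟩
      · rintro (h | ⟨s, (rfl | hs), hx⟩)
        · exact Or.inl (Or.inl h)
        · exact Or.inl (Or.inr hx)
        · exact Or.inr ⟨s, hs, hx⟩

theorem mem_expandB {d : List (Int × List Int)} {S : PySem.Set Int} {x : Int} :
    x ∈ expandB d S ↔ x ∈ S ∨ ∃ s ∈ S, x ∈ chD d s := by
  unfold expandB
  exact mem_foldl_update (chD d) S S x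

theorem subset_expandB (d : List (Int × List Int)) (S : PySem.Set Int) : S ⊆ expandB d S :=
  fun _ hx => mem_expandB.mpr (Or.inl hx)

theorem get?_mk_mem {d : List (Int × List Int)} {v : Int} {cs : List Int}
    (h : PySem.Dict.get? (PySem.Dict.mk d) v = some cs) : (v, cs) ∈ d := by
  induction d with
  | nil => exact absurd h (by simp [PySem.Dict.get?])
  | cons p d ih =>
      rw [show PySem.Dict.mk (p :: d) = PySem.Dict.mk ((p.1, p.2) :: d) by simp,
        PySem.Dict.get?_mk_cons] at h
      by_cases hkv : p.1 == v
      · simp only [hkv, if_pos] at h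
        obtain rfl := eq_of_beq hkv
        obtain rfl : p.2 = cs := by injection h
        exact List.mem_cons_self
      · simp only [hkv, Bool.false_eq_true, reduceIte] at h
        exact List.mem_cons_of_mem _ (ih h)

theorem chD_sub_allChildren {d : List (Int × List Int)} {v : Int} : chD d v ⊆ allChildren d := by
  intro x hx
  unfold chD at hx
  rw [PySem.Dict.getD_eq_get?_getD] at hx
  cases h : PySem.Dict.get? (PySem.Dict.mk d) v with
  | none => rw [h] at hx; simp at hx
  | some cs =>
      rw [h] at hx
      exact List.mem_flatten.mpr ⟨cs, List.mem_map_of_mem (get?_mk_mem h), hx⟩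

theorem mem_expandB_univ (d : List (Int × List Int)) (S : PySem.Set Int) {x : Int}
    (hx : x ∈ expandB d S) : x ∈ S ∨ x ∈ allChildren d := by
  rcases mem_expandB.mp hx with h | ⟨s, _, h⟩
  · exact Or.inl h
  · exact Or.inr (chD_sub_allChildren h)

theorem filter_length_lt {α : Type} {l : List α} {p q : α → Bool}
    (himp : ∀ x, p x = true → q x = true) {e : α} (he : e ∈ l)
    (hq : q e = true) (hp : p e = false) :
    (l.filter p).length < (l.filter q).length := by
  have hsub : (l.filter p).Sublist (l.filter q) := List.monotone_filter_right l himp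
  rcases Nat.lt_or_ge (l.filter p).length (l.filter q).length with h | h
  · exact h
  · exfalso
    have hlen : (l.filter p).length = (l.filter q).length :=
      Nat.le_antisymm hsub.length_le h
    have := hsub.eq_of_length hlen
    have heq : e ∈ l.filter p := this ▸ List.mem_filter.mpr ⟨he, hq⟩
    rw [List.mem_filter, hp] at heq
    exact absurd heq.2 (by simp)

theorem saturB_measure {d : List (Int × List Int)} {S : PySem.Set Int}
    (h : ¬ (expandB d S ⊆ S ∧ S ⊆ expandB d S)) :
    ((allChildren d).filter (fun x => !decide (x ∈ expandB d S))).length <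
      ((allChildren d).filter (fun x => !decide (x ∈ S))).length := by
  have hne : ¬ expandB d S ⊆ S := fun hh => h ⟨hh, subset_expandB d S⟩
  rw [List.subset_def] at hne
  push Not at hne
  obtain ⟨e, he, hnS⟩ := hne
  have heu : e ∈ allChildren d := by
    rcases mem_expandB_univ d S he with h' | h'
    · exact absurd h' hnS
    · exact h'
  refine filter_length_lt (fun x hx => ?_) heu (by simp [hnS]) (by simp [he])
  simp only [Bool.not_eq_true', decide_eq_false_iff_not] at hx ⊢
  exact fun hxS => hx (subset_expandB d S hxS)

-- the while-True loop: recompute expanded; if expanded == learned stop, else continue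
def saturB (d : List (Int × List Int)) (S : PySem.Set Int) : PySem.Set Int :=
  if expandB d S ⊆ S ∧ S ⊆ expandB d S then S else saturB d (expandB d S)
termination_by ((allChildren d).filter (fun x => !decide (x ∈ S))).length
decreasing_by exact saturB_measure (by assumption)

def count_required_skills_alt (skills_tree : List (Int × List Int)) (required_skills : List Int) : Int :=
  let learned := saturB skills_tree (PySem.Set.ofList [0])
  required_skills.foldl (fun c s => if PySem.Set.contains learned s then c else c + 1) 0

-- ===== PRECONDITION & SPEC =====
-- reachB d v: the set of nodes reachable from v along child edges, computed as the
-- (|allChildren d| + 1)-fold child-expansion of {v}; that many rounds provably reach the full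
-- reflexive-transitive closure (mem_reachB_iff below), so membership in reachB is plain
-- graph reachability, stated structurally so that it is decidable by evaluation.
def iterB (d : List (Int × List Int)) : Nat → PySem.Set Int → PySem.Set Int
  | 0, S => S
  | n + 1, S => iterB d n (expandB d S)

def reachB (d : List (Int × List Int)) (v : Int) : PySem.Set Int :=
  iterB d ((allChildren d).length + 1) (PySem.Set.ofList [v])

-- Pre_ excludes exactly the inputs on which A's while-loop never returns: a cycle in the skills
-- tree reachable from skill 0 makes A re-push the same skills forever.  Closed form: no key
-- reachable from 0 lies on a cycle (is reachable again from one of its own children).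
def Pre_count_required_skills (skills_tree : List (Int × List Int)) (required_skills : List Int) : Prop :=
  ∀ p ∈ skills_tree, p.1 ∈ reachB skills_tree 0 →
    ∀ c ∈ chD skills_tree p.1, p.1 ∉ reachB skills_tree c
instance (skills_tree : List (Int × List Int)) (required_skills : List Int) : Decidable (Pre_count_required_skills skills_tree required_skills) := by unfold Pre_count_required_skills; infer_instance

def pvWitness_count_required_skills : (List (Int × List Int)) × List Int :=
  ([((0 : Int), [(1 : Int), 2]), (1, [3]), (5, [0])], [0, 2, 3, 4, 4])

def Spec_count_required_skills (skills_tree : List (Int × List Int)) (required_skills : List Int) (out : Int) : Prop := out = count_required_skills_alt skills_tree required_skills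
instance (skills_tree : List (Int × List Int)) (required_skills : List Int) (out : Int) : Decidable (Spec_count_required_skills skills_tree required_skills out) := by unfold Spec_count_required_skills; infer_instance

-- ===== CLAIM (what is proved, stated in full; the proofs are below) =====
def Claim_equal_count_required_skills : Prop := ∀ (skills_tree : List (Int × List Int)) (required_skills : List Int), Dom_count_required_skills skills_tree required_skills → Pre_count_required_skills skills_tree required_skills → Spec_count_required_skills skills_tree required_skills (count_required_skills skills_tree required_skills)

-- ===== LEMMAS AND PROOFS =====

-- reachability from u along child edges
inductive RF (d : List (Int × List Int)) : Int → Int → Prop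
  | refl (v : Int) : RF d v v
  | tail {u v c : Int} : RF d u v → c ∈ chD d v → RF d u c

theorem RF_trans {d : List (Int × List Int)} {u v w : Int} (h1 : RF d u v) (h2 : RF d v w) :
    RF d u w := by
  induction h2 with
  | refl => exact h1
  | tail _ hc ih => exact RF.tail ih hc

theorem RF_head_iff {d : List (Int × List Int)} {v x : Int} :
    RF d v x ↔ x = v ∨ ∃ c ∈ chD d v, RF d c x := by
  constructor
  · intro h
    induction h with
    | refl => exact Or.inl rfl
    | tail _ hc ih =>
        rcases ih with rfl | ⟨c₀, hc₀, h₀⟩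
        · exact Or.inr ⟨_, hc, RF.refl _⟩
        · exact Or.inr ⟨c₀, hc₀, RF.tail h₀ hc⟩
  · rintro (rfl | ⟨c, hc, h⟩)
    · exact RF.refl _
    · exact RF_trans (RF.tail (RF.refl v) hc) h

theorem subset_saturB (d : List (Int × List Int)) (S : PySem.Set Int) : S ⊆ saturB d S := by
  induction S using saturB.induct d with
  | case1 S hcond =>
      rw [saturB, if_pos hcond]
      exact fun _ hx => hx
  | case2 S hcond ih =>
      rw [saturB, if_neg hcond]
      exact fun x hx => ih (subset_expandB d S hx)

theorem closed_saturB (d : List (Int × List Int)) (S : PySem.Set Int) {x c : Int}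
    (hx : x ∈ saturB d S) (hc : c ∈ chD d x) : c ∈ saturB d S := by
  induction S using saturB.induct d with
  | case1 S hcond =>
      rw [saturB, if_pos hcond] at hx ⊢
      exact hcond.1 (mem_expandB.mpr (Or.inr ⟨x, hx, hc⟩))
  | case2 S hcond ih =>
      rw [saturB, if_neg hcond] at hx ⊢
      exact ih hx

theorem sound_saturB (d : List (Int × List Int)) (S : PySem.Set Int) {x : Int}
    (hx : x ∈ saturB d S) : ∃ s ∈ S, RF d s x := by
  induction S using saturB.induct d with
  | case1 S hcond =>
      rw [saturB, if_pos hcond] at hx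
      exact ⟨x, hx, RF.refl x⟩
  | case2 S hcond ih =>
      rw [saturB, if_neg hcond] at hx
      obtain ⟨e, he, hre⟩ := ih hx
      rcases mem_expandB.mp he with h | ⟨s, hs, hcs⟩
      · exact ⟨e, h, hre⟩
      · exact ⟨s, hs, RF_trans (RF.tail (RF.refl s) hcs) hre⟩

theorem mem_saturB_iff {d : List (Int × List Int)} {S : PySem.Set Int} {x : Int} :
    x ∈ saturB d S ↔ ∃ s ∈ S, RF d s x := by
  constructor
  · exact sound_saturB d S
  · rintro ⟨s, hs, h⟩
    induction h with
    | refl => exact subset_saturB d S hs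
    | tail _ hc ih => exact closed_saturB d S ih hc

-- height of a node: number of keys reachable from it; CC: strict bound on any children list (+2)
def hD (d : List (Int × List Int)) (v : Int) : Nat :=
  ((d.map Prod.fst).toFinset.filter (fun k => k ∈ saturB d (PySem.Set.ofList [v]))).card

def CC (d : List (Int × List Int)) : Nat := (allChildren d).length + 2

def MM (d : List (Int × List Int)) (stack : List Int) : Nat :=
  (stack.map (fun v => CC d ^ hD d v)).sum

theorem mem_saturB_singleton {d : List (Int × List Int)} {v x : Int} :
    x ∈ saturB d (PySem.Set.ofList [v]) ↔ RF d v x := by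
  rw [mem_saturB_iff]
  constructor
  · rintro ⟨s, hs, h⟩
    rw [PySem.Set.mem_ofList] at hs
    simp only [List.mem_singleton] at hs
    exact hs ▸ h
  · intro h
    exact ⟨v, by simp [PySem.Set.mem_ofList], h⟩


theorem add_of_mem {S : PySem.Set Int} {x : Int} (h : x ∈ S) : PySem.Set.add S x = S := by
  simp [PySem.Set.add, h]

theorem foldl_add_of_subset : ∀ (xs : List Int) (T : PySem.Set Int), xs ⊆ T →
    xs.foldl PySem.Set.add T = T := by
  intro xs
  induction xs with
  | nil => intro T _; rfl
  | cons a xs ih =>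
      intro T h
      simp only [List.foldl_cons, add_of_mem (h List.mem_cons_self)]
      exact ih T (fun x hx => h (List.mem_cons_of_mem _ hx))

theorem expand_eq_of_closed {d : List (Int × List Int)} {S : PySem.Set Int}
    (h : ∀ s ∈ S, chD d s ⊆ S) : expandB d S = S := by
  unfold expandB
  have aux : ∀ l : List Int, (∀ s ∈ l, chD d s ⊆ S) →
      l.foldl (fun E s => (chD d s).foldl PySem.Set.add E) S = S := by
    intro l
    induction l with
    | nil => intro _; rfl
    | cons a l ih =>
        intro hl
        simp only [List.foldl_cons, foldl_add_of_subset _ _ (hl a List.mem_cons_self)]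
        exact ih (fun s hs => hl s (List.mem_cons_of_mem _ hs))
  exact aux S h

theorem iterB_stable {d : List (Int × List Int)} {S : PySem.Set Int}
    (h : ∀ s ∈ S, chD d s ⊆ S) : ∀ n, iterB d n S = S := by
  intro n
  induction n with
  | zero => rfl
  | succ n ih => simp only [iterB, expand_eq_of_closed h, ih]

theorem not_closed_cond {d : List (Int × List Int)} {S : PySem.Set Int}
    (h : ¬ ∀ s ∈ S, chD d s ⊆ S) : ¬ (expandB d S ⊆ S ∧ S ⊆ expandB d S) := by
  rintro ⟨hes, _⟩
  apply h
  intro s hs c hc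
  exact hes (mem_expandB.mpr (Or.inr ⟨s, hs, hc⟩))

theorem iterB_closed {d : List (Int × List Int)} :
    ∀ (n : Nat) (S : PySem.Set Int),
      ((allChildren d).filter (fun x => !decide (x ∈ S))).length ≤ n →
      ∀ x ∈ iterB d n S, chD d x ⊆ iterB d n S := by
  intro n
  induction n with
  | zero =>
      intro S hm x hx c hc
      have hU : ∀ u ∈ allChildren d, u ∈ S := by
        intro u hu
        by_contra hns
        have : u ∈ (allChildren d).filter (fun x => !decide (x ∈ S)) :=
          List.mem_filter.mpr ⟨hu, by simp [hns]⟩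
        rw [List.length_eq_zero_iff.mp (Nat.le_zero.mp hm)] at this
        simp at this
      exact hU c (chD_sub_allChildren hc)
  | succ n ih =>
      intro S hm
      by_cases hcl : ∀ s ∈ S, chD d s ⊆ S
      · rw [iterB_stable hcl]
        exact fun x hx c hc => hcl x hx hc
      · show ∀ x ∈ iterB d n (expandB d S), chD d x ⊆ iterB d n (expandB d S)
        apply ih
        have := saturB_measure (not_closed_cond hcl)
        omega

theorem subset_iterB {d : List (Int × List Int)} :
    ∀ (n : Nat) (S : PySem.Set Int), S ⊆ iterB d n S := by
  intro n
  induction n with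
  | zero => intro S x hx; exact hx
  | succ n ih =>
      intro S x hx
      exact ih (expandB d S) (subset_expandB d S hx)

theorem sound_iterB {d : List (Int × List Int)} :
    ∀ (n : Nat) (S : PySem.Set Int) (x : Int), x ∈ iterB d n S → ∃ s ∈ S, RF d s x := by
  intro n
  induction n with
  | zero => intro S x hx; exact ⟨x, hx, RF.refl x⟩
  | succ n ih =>
      intro S x hx
      obtain ⟨e, he, hre⟩ := ih (expandB d S) x hx
      rcases mem_expandB.mp he with h | ⟨s, hs, hcs⟩
      · exact ⟨e, h, hre⟩
      · exact ⟨s, hs, RF_trans (RF.tail (RF.refl s) hcs) hre⟩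

theorem mem_reachB_iff {d : List (Int × List Int)} {v x : Int} :
    x ∈ reachB d v ↔ RF d v x := by
  constructor
  · intro hx
    obtain ⟨s, hs, h⟩ := sound_iterB _ _ _ hx
    rw [PySem.Set.mem_ofList] at hs
    simp only [List.mem_singleton] at hs
    exact hs ▸ h
  · intro h
    induction h with
    | refl =>
        exact subset_iterB _ _ (by simp [PySem.Set.mem_ofList])
    | tail _ hc ih =>
        refine iterB_closed _ _ ?_ _ ih hc
        have := List.length_filter_le
          (fun x => !decide (x ∈ (PySem.Set.ofList [v] : PySem.Set Int))) (allChildren d)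
        omega

theorem key_of_chD {d : List (Int × List Int)} {v c : Int} (hc : c ∈ chD d v) :
    ∃ cs, PySem.Dict.get? (PySem.Dict.mk d) v = some cs ∧ chD d v = cs := by
  unfold chD at hc ⊢
  rw [PySem.Dict.getD_eq_get?_getD] at hc ⊢
  cases h : PySem.Dict.get? (PySem.Dict.mk d) v with
  | none => rw [h] at hc; simp at hc
  | some cs => exact ⟨cs, rfl, rfl⟩

theorem hD_lt {d : List (Int × List Int)} {req : List Int} (hpre : Pre_count_required_skills d req)
    {v c : Int} (hv : RF d 0 v) (hc : c ∈ chD d v) : hD d c < hD d v := by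
  obtain ⟨cs, hget, hchd⟩ := key_of_chD hc
  have hmem : (v, cs) ∈ d := get?_mk_mem hget
  have hvS : v ∈ reachB d 0 := mem_reachB_iff.mpr hv
  have hnc : v ∉ saturB d (PySem.Set.ofList [c]) := fun hsat =>
    hpre (v, cs) hmem hvS c hc (mem_reachB_iff.mpr (mem_saturB_singleton.mp hsat))
  apply Finset.card_lt_card
  constructor
  · intro k hk
    rw [Finset.mem_filter] at hk ⊢
    refine ⟨hk.1, ?_⟩
    have h1 : RF d c k := mem_saturB_singleton.mp hk.2
    exact mem_saturB_singleton.mpr (RF_trans (RF.tail (RF.refl v) hc) h1)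
  · intro hsub
    have hvk : v ∈ (d.map Prod.fst).toFinset :=
      List.mem_toFinset.mpr (List.mem_map_of_mem hmem)
    have hvin : v ∈ (d.map Prod.fst).toFinset.filter
        (fun k => k ∈ saturB d (PySem.Set.ofList [v])) :=
      Finset.mem_filter.mpr ⟨hvk, mem_saturB_singleton.mpr (RF.refl v)⟩
    have := Finset.mem_filter.mp (hsub hvin)
    exact hnc this.2

theorem chD_length_le {d : List (Int × List Int)} {v : Int} :
    (chD d v).length ≤ (allChildren d).length := by
  by_cases h : chD d v = []
  · simp [h]
  · obtain ⟨c, hc⟩ := List.exists_mem_of_ne_nil _ h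
    obtain ⟨cs, hget, hchd⟩ := key_of_chD hc
    have hmem : cs ∈ d.map Prod.snd := List.mem_map_of_mem (get?_mk_mem hget)
    rw [hchd]
    unfold allChildren
    rw [List.length_flatten]
    exact List.single_le_sum (by simp) _ (List.mem_map_of_mem hmem)

theorem hD_pos {d : List (Int × List Int)} {v c : Int} (hc : c ∈ chD d v) : 1 ≤ hD d v := by
  obtain ⟨cs, hget, _⟩ := key_of_chD hc
  have hvk : v ∈ (d.map Prod.fst).toFinset :=
    List.mem_toFinset.mpr (List.mem_map_of_mem (get?_mk_mem hget))
  exact Finset.card_pos.mpr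
    ⟨v, Finset.mem_filter.mpr ⟨hvk, mem_saturB_singleton.mpr (RF.refl v)⟩⟩

theorem MM_children_lt {d : List (Int × List Int)} {req : List Int}
    (hpre : Pre_count_required_skills d req) {v : Int} (hv : RF d 0 v) :
    MM d (chD d v).reverse + 1 ≤ CC d ^ hD d v := by
  by_cases hnil : chD d v = []
  · have h1 : MM d (chD d v).reverse = 0 := by simp [MM, hnil]
    have h2 : 1 ≤ CC d ^ hD d v := Nat.one_le_pow _ _ (by unfold CC; omega)
    omega
  · obtain ⟨c₀, hc₀⟩ := List.exists_mem_of_ne_nil _ hnil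
    have hk1 : 1 ≤ hD d v := hD_pos hc₀
    have hbound : ∀ x ∈ (chD d v).reverse.map (fun w => CC d ^ hD d w),
        x ≤ CC d ^ (hD d v - 1) := by
      intro x hx
      rw [List.mem_map] at hx
      obtain ⟨w, hw, rfl⟩ := hx
      rw [List.mem_reverse] at hw
      have := hD_lt hpre hv hw
      exact Nat.pow_le_pow_right (by unfold CC; omega) (by omega)
    have hsum : MM d (chD d v).reverse ≤
        (chD d v).reverse.length * CC d ^ (hD d v - 1) := by
      unfold MM
      calc ((chD d v).reverse.map (fun w => CC d ^ hD d w)).sum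
          ≤ ((chD d v).reverse.map (fun w => CC d ^ hD d w)).length •
              (CC d ^ (hD d v - 1)) := List.sum_le_card_nsmul _ _ hbound
        _ = (chD d v).reverse.length * CC d ^ (hD d v - 1) := by
              simp [smul_eq_mul]
    have hlen : (chD d v).reverse.length ≤ CC d - 2 := by
      rw [List.length_reverse]
      have := chD_length_le (d := d) (v := v)
      unfold CC; omega
    have hpow : CC d ^ hD d v = CC d * CC d ^ (hD d v - 1) := by
      conv_lhs => rw [show hD d v = (hD d v - 1) + 1 by omega]
      rw [pow_succ]; ring
    have hCC : 2 ≤ CC d := by unfold CC; omega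
    have hp1 : 1 ≤ CC d ^ (hD d v - 1) := Nat.one_le_pow _ _ (by omega)
    calc MM d (chD d v).reverse + 1
        ≤ (CC d - 2) * CC d ^ (hD d v - 1) + 1 := by
          have := Nat.mul_le_mul_right (CC d ^ (hD d v - 1)) hlen
          omega
      _ ≤ CC d ^ hD d v := by
          rw [hpow]
          have : (CC d - 2) * CC d ^ (hD d v - 1) + 2 * CC d ^ (hD d v - 1)
              = CC d * CC d ^ (hD d v - 1) := by
            rw [← Nat.add_mul, Nat.sub_add_cancel hCC]
          omega

theorem loopA_char {d : List (Int × List Int)} {req : List Int}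
    (hpre : Pre_count_required_skills d req) :
    ∀ (f : Nat) (stack : List Int) (learned : PySem.Set Int),
      (∀ v ∈ stack, RF d 0 v) → MM d stack + 1 ≤ f →
      ∀ x, x ∈ loopA d f stack learned ↔ x ∈ learned ∨ ∃ s ∈ stack, RF d s x := by
  intro f
  induction f with
  | zero => intro stack learned _ hf; omega
  | succ f ih =>
      intro stack learned hstack hf x
      match stack with
      | [] => simp [loopA]
      | v :: rest =>
          have hv : RF d 0 v := hstack v List.mem_cons_self
          have hrest : ∀ w ∈ rest, RF d 0 w := fun w hw => hstack w (List.mem_cons_of_mem _ hw)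
          have hMM : MM d (v :: rest) = CC d ^ hD d v + MM d rest := by
            unfold MM; simp
          have hkids : MM d ((chD d v).reverse ++ rest) =
              MM d (chD d v).reverse + MM d rest := by
            unfold MM; simp
          have hchpre := MM_children_lt hpre hv
          cases hget : PySem.Dict.get? (PySem.Dict.mk d) v with
          | some cs =>
              have hchd : chD d v = cs := by
                unfold chD; rw [PySem.Dict.getD_eq_get?_getD, hget]; rfl
              have hstep : loopA d (f + 1) (v :: rest) learned =
                  loopA d f (cs.reverse ++ rest) (PySem.Set.add learned v) := by
                simp [loopA, hget]
              rw [hstep, ← hchd]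
              rw [ih ((chD d v).reverse ++ rest) (PySem.Set.add learned v)
                (by
                  intro w hw
                  rcases List.mem_append.mp hw with hw | hw
                  · exact RF.tail hv (List.mem_reverse.mp hw)
                  · exact hrest w hw)
                (by rw [hkids]; omega) x]
              rw [PySem.Set.mem_add]
              constructor
              · rintro ((hl | rfl) | ⟨s, hs, hrs⟩)
                · exact Or.inl hl
                · exact Or.inr ⟨x, List.mem_cons_self, RF.refl x⟩
                · rcases List.mem_append.mp hs with hs' | hs'
                  · exact Or.inr ⟨v, List.mem_cons_self,
                      RF_trans (RF.tail (RF.refl v) (List.mem_reverse.mp hs')) hrs⟩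
                  · exact Or.inr ⟨s, List.mem_cons_of_mem _ hs', hrs⟩
              · rintro (hl | ⟨s, hs, hrs⟩)
                · exact Or.inl (Or.inl hl)
                · rcases List.mem_cons.mp hs with rfl | hs'
                  · rcases RF_head_iff.mp hrs with rfl | ⟨c, hc, hcx⟩
                    · exact Or.inl (Or.inr rfl)
                    · exact Or.inr ⟨c, List.mem_append.mpr
                        (Or.inl (List.mem_reverse.mpr hc)), hcx⟩
                  · exact Or.inr ⟨s, List.mem_append.mpr (Or.inr hs'), hrs⟩
          | none =>
              have hchd : chD d v = [] := by
                unfold chD; rw [PySem.Dict.getD_eq_get?_getD, hget]; rfl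
              have hstep : loopA d (f + 1) (v :: rest) learned =
                  loopA d f rest (PySem.Set.add learned v) := by
                simp [loopA, hget]
              rw [hstep]
              rw [ih rest (PySem.Set.add learned v) hrest
                (by
                  have h1 : 1 ≤ CC d ^ hD d v := Nat.one_le_pow _ _ (by unfold CC; omega)
                  omega) x]
              rw [PySem.Set.mem_add]
              constructor
              · rintro ((hl | rfl) | ⟨s, hs, hrs⟩)
                · exact Or.inl hl
                · exact Or.inr ⟨x, List.mem_cons_self, RF.refl x⟩
                · exact Or.inr ⟨s, List.mem_cons_of_mem _ hs, hrs⟩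
              · rintro (hl | ⟨s, hs, hrs⟩)
                · exact Or.inl (Or.inl hl)
                · rcases List.mem_cons.mp hs with rfl | hs'
                  · rcases RF_head_iff.mp hrs with rfl | ⟨c, hc, _⟩
                    · exact Or.inl (Or.inr rfl)
                    · rw [hchd] at hc; simp at hc
                  · exact Or.inr ⟨s, hs', hrs⟩

theorem contains_iff_mem {S : PySem.Set Int} {x : Int} :
    PySem.Set.contains S x = true ↔ x ∈ S := by
  simp [PySem.Set.contains]

theorem count_congr {S T : List Int} (h : ∀ x : Int, x ∈ S ↔ x ∈ T) (req : List Int) :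
    ∀ acc : Int,
      req.foldl (fun c s => if PySem.Set.contains S s then c else c + 1) acc =
      req.foldl (fun c s => if PySem.Set.contains T s then c else c + 1) acc := by
  induction req with
  | nil => intro acc; rfl
  | cons r req ih =>
      intro acc
      have hco : PySem.Set.contains S r = PySem.Set.contains T r := by
        by_cases hr : r ∈ S
        · rw [contains_iff_mem.mpr hr, (contains_iff_mem.mpr ((h r).mp hr)).symm]
        · have : PySem.Set.contains S r = false := by
            rw [← Bool.not_eq_true]; rw [contains_iff_mem]; exact hr
          have h2 : PySem.Set.contains T r = false := by
            rw [← Bool.not_eq_true]; rw [contains_iff_mem]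
            exact fun hx => hr ((h r).mpr hx)
          rw [this, h2]
      simp only [List.foldl_cons, hco, ih]

-- ===== VERDICT (by name: the statement is the Claim_ definition above) =====
theorem count_required_skills_spec : Claim_equal_count_required_skills := by
  intro d req _ hpre
  unfold Spec_count_required_skills count_required_skills count_required_skills_alt
  apply count_congr
  intro x
  have hfuel : MM d [0] + 1 ≤ fuelA d := by
    have hle : hD d 0 ≤ d.length + 1 := by
      calc hD d 0 ≤ (d.map Prod.fst).toFinset.card := Finset.card_filter_le _ _
        _ ≤ (d.map Prod.fst).length := List.toFinset_card_le _
        _ = d.length := List.length_map _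
        _ ≤ d.length + 1 := Nat.le_succ _
    have : CC d ^ hD d 0 ≤ CC d ^ (d.length + 1) :=
      Nat.pow_le_pow_right (by unfold CC; omega) hle
    unfold MM fuelA
    simp only [List.map_cons, List.map_nil, List.sum_cons, List.sum_nil]
    unfold CC at this ⊢
    omega
  rw [loopA_char hpre (fuelA d) [0] PySem.Set.empty
    (by intro v hv; simp only [List.mem_singleton] at hv; subst hv; exact RF.refl 0) hfuel x]
  rw [mem_saturB_singleton]
  constructor
  · rintro (h | ⟨s, hs, hrs⟩)
    · exact absurd h (by simp [PySem.Set.empty])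
    · simp only [List.mem_singleton] at hs
      exact hs ▸ hrs
  · intro h
    exact Or.inr ⟨0, List.mem_singleton.mpr rfl, h⟩
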